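-- pv_equiv track=rewrite | github.com/ProfessorRex/numbergame | app/src/main/python/numgame.py | is_alternating
-- ===== SOURCE A (Python) =====
-- def get_digits(num):
--     digits = []
--     string = str(num)
--     for digit in string:
--         digits.append(int(digit))
--     return digits
--
-- def is_alternating(num):
--     digits = get_digits(num)
--     parity = 2
--     for digit in digits:
--         if (digit % 2) == parity:
--             return False
--         else:
--             parity = (digit % 2)
--     return True
-- ===== SOURCE B (Python) =====
-- def is_alternating(num):
--     n = num
--     while n >= 10:
--         if n % 2 == (n // 10) % 2:
--             return False
--         n //= 10
--     return True
-- ===== Notes on version B (the rewrite author's own statement) =====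
-- stated objective: alternative
-- what changed: B drops the str()/get_digits conversion entirely and decides alternation arithmetically, repeatedly comparing n % 2 with (n // 10) % 2 while dividing by 10 (using that n % 2 is the last decimal digit's parity).
import Mathlib
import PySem

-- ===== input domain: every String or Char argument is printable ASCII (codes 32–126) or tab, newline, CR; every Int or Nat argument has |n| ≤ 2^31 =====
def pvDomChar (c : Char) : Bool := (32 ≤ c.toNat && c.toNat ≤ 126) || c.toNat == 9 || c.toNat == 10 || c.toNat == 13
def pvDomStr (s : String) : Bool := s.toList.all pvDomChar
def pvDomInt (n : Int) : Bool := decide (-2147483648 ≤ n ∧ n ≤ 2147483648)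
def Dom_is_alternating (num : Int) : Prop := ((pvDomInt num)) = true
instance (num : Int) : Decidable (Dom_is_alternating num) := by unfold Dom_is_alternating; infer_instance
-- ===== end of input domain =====

-- B replaces A's string/digit-list pass with a purely arithmetic loop comparing n % 2 against (n // 10) % 2 while dividing by 10 (alternative algorithm, same cost).

-- ===== PORT A =====
-- get_digits: str(num), then int(digit) for each char (int('-') raises ValueError; Pre_ excludes negatives, so .getD 0 is never hit under Pre_)
def pvGetDigits (num : Int) : List Int :=
  (PySem.Int.toChars num).foldl (fun acc c => acc ++ [(PySem.Int.ofStr? (String.ofList [c])).getD 0]) []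

def pvLoopA : Int → List Int → Bool
  | _, [] => true
  | parity, d :: ds =>
      if PySem.Int.mod d 2 == parity then false else pvLoopA (PySem.Int.mod d 2) ds

def is_alternating (num : Int) : Bool :=
  pvLoopA 2 (pvGetDigits num)

-- ===== PORT B =====
-- while n >= 10: return False if n % 2 == (n // 10) % 2, else n //= 10
def pvLoopB (n : Int) : Bool :=
  if 10 ≤ n then
    if PySem.Int.mod n 2 == PySem.Int.mod (PySem.Int.floordiv n 10) 2 then false
    else pvLoopB (PySem.Int.floordiv n 10)
  else true
termination_by n.toNat
decreasing_by
  rw [PySem.Int.floordiv_eq_ediv_of_pos (by omega)]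
  omega

def is_alternating_alt (num : Int) : Bool := pvLoopB num

-- ===== PRECONDITION & SPEC =====
-- Pre_ excludes negative num, on which A's int('-') raises ValueError.
def Pre_is_alternating (num : Int) : Prop := 0 ≤ num
instance (num : Int) : Decidable (Pre_is_alternating num) := by unfold Pre_is_alternating; infer_instance
def pvWitness_is_alternating : Int := (10)

def Spec_is_alternating (num : Int) (out : Bool) : Prop := out = is_alternating_alt num
instance (num : Int) (out : Bool) : Decidable (Spec_is_alternating num out) := by unfold Spec_is_alternating; infer_instance

-- ===== CLAIM (what is proved, stated in full; the proofs are below) =====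
def Claim_equal_is_alternating : Prop := ∀ (num : Int), Dom_is_alternating num → Pre_is_alternating num → Spec_is_alternating num (is_alternating num)

-- ===== LEMMAS AND PROOFS =====

-- little-endian decimal digits, with [0] for 0 (so it is never empty)
def pvND (m : Nat) : List Nat := if m = 0 then [0] else Nat.digits 10 m

-- the parity-alternation relation both programs decide, on Nat digits
def pvQ (a b : Nat) : Prop := ¬ a % 2 = b % 2

theorem pvND_small {m : Nat} (h : m < 10) : pvND m = [m] := by
  unfold pvND
  rcases Nat.eq_zero_or_pos m with h0 | h0
  · simp [h0]
  · rw [if_neg (by omega), Nat.digits_def' (by omega) h0,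
      Nat.div_eq_of_lt h, Nat.mod_eq_of_lt h]
    simp

theorem pvND_big {m : Nat} (h : 10 ≤ m) : pvND m = m % 10 :: pvND (m / 10) := by
  unfold pvND
  rw [if_neg (by omega), Nat.digits_def' (by norm_num) (by omega),
    if_neg (by omega)]

theorem pvND_ne_nil (m : Nat) : pvND m ≠ [] := by
  unfold pvND
  split
  · simp
  · simp [Nat.digits_ne_nil_iff_ne_zero, *]

theorem pvND_lt {m d : Nat} (hd : d ∈ pvND m) : d < 10 := by
  unfold pvND at hd
  split at hd
  · simp at hd; omega
  · exact Nat.digits_lt_base (by norm_num) hd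

-- Nat.toDigits prints pvND in reverse, via digitChar
theorem pvToDigitsCore_eq (f : Nat) : ∀ (m : Nat) (acc : List Char), m < f →
    Nat.toDigitsCore 10 f m acc = ((pvND m).map Nat.digitChar).reverse ++ acc := by
  induction f with
  | zero => intro m acc h; omega
  | succ f ih =>
      intro m acc h
      rw [show Nat.toDigitsCore 10 (f+1) m acc
          = (if m / 10 = 0 then Nat.digitChar (m % 10) :: acc
             else Nat.toDigitsCore 10 f (m / 10) (Nat.digitChar (m % 10) :: acc)) from rfl]
      by_cases h10 : m < 10
      · rw [if_pos (Nat.div_eq_of_lt h10), pvND_small h10, Nat.mod_eq_of_lt h10]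
        simp
      · rw [if_neg (by omega : ¬ m / 10 = 0),
          ih (m / 10) (Nat.digitChar (m % 10) :: acc) (by omega),
          pvND_big (m := m) (by omega)]
        simp

theorem pvToDigits_eq (m : Nat) :
    Nat.toDigits 10 m = ((pvND m).map Nat.digitChar).reverse := by
  have := pvToDigitsCore_eq (m + 1) m [] (by omega)
  simpa [Nat.toDigits] using this

-- parsing one printed decimal digit: what A's int(digit) computes
theorem pvParseDigit {d : Nat} (h : d < 10) :
    (PySem.Int.ofStr? (String.ofList [Nat.digitChar d])).getD 0 = (d : Int) := by
  interval_cases d <;> decide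

theorem pvMod_two_ne_two (d : Int) : PySem.Int.mod d 2 ≠ 2 := by
  have := PySem.Int.mod_lt d (b := 2) (by norm_num)
  omega

-- A's loop, once seeded with a real parity, is the alternating-chain test
theorem pvLoopA_chain (ds : List Int) (x : Int) :
    pvLoopA (PySem.Int.mod x 2) ds = true ↔
      (x :: ds).IsChain (fun a b => ¬ PySem.Int.mod a 2 = PySem.Int.mod b 2) := by
  induction ds generalizing x with
  | nil => simp [pvLoopA]
  | cons d ds ih =>
      rw [pvLoopA, List.isChain_cons_cons]
      by_cases h : PySem.Int.mod d 2 = PySem.Int.mod x 2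
      · rw [if_pos (by simpa using h)]
        simp only [Bool.false_eq_true, false_iff]
        exact fun hc => hc.1 h.symm
      · simp only [beq_iff_eq, if_neg h, ih d]
        constructor
        · exact fun hc => ⟨fun he => h he.symm, hc⟩
        · exact fun hc => hc.2

-- B's loop on a Nat is the alternating-chain test on the little-endian digits
theorem pvLoopB_chain (m : Nat) : pvLoopB (m : Int) = true ↔ (pvND m).IsChain pvQ := by
  induction m using Nat.strong_induction_on with
  | _ m ih =>
      rw [pvLoopB]
      by_cases h10 : 10 ≤ m
      · rw [if_pos (by exact_mod_cast h10)]
        have hdiv : PySem.Int.floordiv (m : Int) 10 = ((m / 10 : Nat) : Int) := by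
          exact_mod_cast PySem.Int.floordiv_natCast m 10
        have hm2 : PySem.Int.mod (m : Int) 2 = ((m % 2 : Nat) : Int) := by
          exact_mod_cast PySem.Int.mod_natCast m 2
        rw [hdiv]
        have hd2 : PySem.Int.mod ((m / 10 : Nat) : Int) 2 = ((m / 10 % 2 : Nat) : Int) := by
          exact_mod_cast PySem.Int.mod_natCast (m / 10) 2
        rw [hm2, hd2]
        rw [pvND_big (m := m) h10]
        obtain ⟨hh, t, hht⟩ := List.exists_cons_of_ne_nil (pvND_ne_nil (m / 10))
        have hhv : hh = (m / 10) % 10 := by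
          rcases Nat.lt_or_ge (m / 10) 10 with hs | hs
          · have := pvND_small hs ▸ hht
            rw [Nat.mod_eq_of_lt hs]
            exact (List.cons.injEq _ _ _ _ ▸ this.symm).1
          · have := pvND_big hs ▸ hht
            exact (List.cons.injEq _ _ _ _ ▸ this.symm).1
        rw [hht, List.isChain_cons_cons, ← hht]
        have hpar : (m % 10) % 2 = m % 2 := Nat.mod_mod_of_dvd m (by norm_num)
        have hpar2 : hh % 2 = (m / 10) % 2 := by
          rw [hhv]; exact Nat.mod_mod_of_dvd (m / 10) (by norm_num)
        by_cases he : m % 2 = (m / 10) % 2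
        · rw [if_pos (by simp [he])]
          simp [pvQ, hpar, hpar2, he, hht]
        · rw [if_neg (by simp; exact_mod_cast he), ih (m / 10) (by omega)]
          have hq : pvQ (m % 10) hh := by unfold pvQ; omega
          exact ⟨fun hc => ⟨hq, hc⟩, fun hc => hc.2⟩
      · rw [if_neg (by exact_mod_cast h10), pvND_small (by omega)]
        simp

-- ===== VERDICT (by name: the statement is the Claim_ definition above) =====
theorem is_alternating_spec : Claim_equal_is_alternating := by
  intro num _ hpre
  unfold Spec_is_alternating is_alternating is_alternating_alt pvGetDigits
  obtain ⟨m, rfl⟩ := Int.eq_ofNat_of_zero_le hpre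
  rw [PySem.List.foldl_append_singleton_eq_map, List.nil_append]
  -- the string side: characters of str(m), parsed back to Int digits
  have htc : PySem.Int.toChars (m : Int) = ((pvND m).map Nat.digitChar).reverse := by
    rw [show PySem.Int.toChars (m : Int)
        = Nat.toDigits 10 ((m : Int)).toNat from by
          unfold PySem.Int.toChars; rw [if_neg (by omega)],
      Int.toNat_natCast, pvToDigits_eq]
  have hparse : (((pvND m).map Nat.digitChar).reverse).map
      (fun c => (PySem.Int.ofStr? (String.ofList [c])).getD 0)
      = ((pvND m).map Int.ofNat).reverse := by
    rw [List.map_reverse, List.map_map]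
    congr 1
    exact List.map_congr_left (fun d hd => by simpa using pvParseDigit (pvND_lt hd))
  rw [htc, hparse]
  -- both sides are the alternating-chain test, up to list reversal
  obtain ⟨x, ds, hxds⟩ := List.exists_cons_of_ne_nil
    (show ((pvND m).map Int.ofNat).reverse ≠ [] from by
      simp only [ne_eq, List.reverse_eq_nil_iff, List.map_eq_nil_iff]
      exact pvND_ne_nil m)
  have hseed : pvLoopA 2 (x :: ds) = pvLoopA (PySem.Int.mod x 2) ds := by
    rw [pvLoopA, if_neg (by simpa using pvMod_two_ne_two x)]
  rw [hxds, hseed, Bool.eq_iff_iff, pvLoopA_chain, ← hxds, pvLoopB_chain,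
    List.isChain_reverse, List.isChain_map]
  have hmc : ∀ k : Nat, PySem.Int.mod (Int.ofNat k) 2 = Int.ofNat (k % 2) := fun k => by
    exact_mod_cast PySem.Int.mod_natCast k 2
  constructor
  · intro hc
    refine hc.imp (fun a b hab => ?_)
    intro he
    exact hab (by rw [hmc, hmc, he])
  · intro hc
    refine hc.imp (fun a b hab => ?_)
    intro he
    apply hab
    rw [hmc, hmc] at he
    exact (Int.ofNat_inj.mp he).symm
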